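-- pv_equiv track=rewrite | github.com/ndaelman-hu/nomad_workflow_recreator | src/workflow_orchestrator.py | _are_compatible_entry_types
-- ===== SOURCE A (Python) =====
-- def _are_compatible_entry_types(type1: str, type2: str) -> bool:
--     """Check if two entry types are compatible in a workflow"""
--     compatible_sequences = [
--         ["geometry_optimization", "single_point", "dos"],
--         ["structure", "scf", "band_structure"],
--         ["optimization", "frequency", "thermodynamics"]
--     ]
--
--     for sequence in compatible_sequences:
--         if type1.lower() in sequence and type2.lower() in sequence:
--             return True
--
--     return False
-- ===== SOURCE B (Python) =====
-- _COMPAT_PAIRS = {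
--     (a, b)
--     for seq in [
--         ["geometry_optimization", "single_point", "dos"],
--         ["structure", "scf", "band_structure"],
--         ["optimization", "frequency", "thermodynamics"],
--     ]
--     for a in seq
--     for b in seq
-- }
--
--
-- def _are_compatible_entry_types(type1: str, type2: str) -> bool:
--     """Check if two entry types are compatible in a workflow"""
--     return (type1.lower(), type2.lower()) in _COMPAT_PAIRS
-- ===== Notes on version B (the rewrite author's own statement) =====
-- stated objective: alternative
-- what changed: Instead of looping over the three sequences and testing both strings' membership in each, B precomputes once the closure of all compatible (a,b) pairs (the Cartesian square of each sequence) and answers with a single pair-membership test on the lowered pair.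
import Mathlib
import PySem

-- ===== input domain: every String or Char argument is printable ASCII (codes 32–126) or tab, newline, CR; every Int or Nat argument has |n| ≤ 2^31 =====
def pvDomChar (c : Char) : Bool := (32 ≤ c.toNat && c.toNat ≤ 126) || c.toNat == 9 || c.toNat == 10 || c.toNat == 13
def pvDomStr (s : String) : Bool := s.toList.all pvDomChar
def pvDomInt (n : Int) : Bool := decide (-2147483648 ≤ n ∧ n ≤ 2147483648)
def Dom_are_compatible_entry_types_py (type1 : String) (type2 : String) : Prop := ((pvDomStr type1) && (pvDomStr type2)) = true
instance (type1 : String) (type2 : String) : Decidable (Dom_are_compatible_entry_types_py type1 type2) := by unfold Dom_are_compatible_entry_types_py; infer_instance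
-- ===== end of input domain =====

-- B replaces A's per-call loop over the three sequences (two membership scans each) by a pair-closure set built once and one pair-membership test (alternative; return value only).

-- ===== PORT A =====
def pvCompatibleSequences : List (List String) :=
  [["geometry_optimization", "single_point", "dos"],
   ["structure", "scf", "band_structure"],
   ["optimization", "frequency", "thermodynamics"]]

-- the 'for sequence in compatible_sequences: if … : return True' loop
def pvCompatLoop (type1 type2 : String) : List (List String) → Bool
  | [] => false
  | seq :: rest =>
    if seq.contains (PySem.Str.lower type1) && seq.contains (PySem.Str.lower type2) then true
    else pvCompatLoop type1 type2 rest

def are_compatible_entry_types_py (type1 : String) (type2 : String) : Bool :=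
  pvCompatLoop type1 type2 pvCompatibleSequences

-- ===== PORT B =====
-- the set comprehension {(a, b) for seq in [...] for a in seq for b in seq}
def pvCompatPairs : PySem.Set (String × String) :=
  PySem.Set.ofList
    ([["geometry_optimization", "single_point", "dos"],
      ["structure", "scf", "band_structure"],
      ["optimization", "frequency", "thermodynamics"]].flatMap
      (fun seq => seq.flatMap (fun a => seq.map (fun b => (a, b)))))

def are_compatible_entry_types_py_alt (type1 : String) (type2 : String) : Bool :=
  PySem.Set.contains pvCompatPairs (PySem.Str.lower type1, PySem.Str.lower type2)

-- ===== PRECONDITION & SPEC =====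
def Spec_are_compatible_entry_types_py (type1 : String) (type2 : String) (out : Bool) : Prop := out = are_compatible_entry_types_py_alt type1 type2
instance (type1 : String) (type2 : String) (out : Bool) : Decidable (Spec_are_compatible_entry_types_py type1 type2 out) := by unfold Spec_are_compatible_entry_types_py; infer_instance

-- ===== CLAIM =====
def Claim_equal_are_compatible_entry_types_py : Prop := ∀ (type1 : String) (type2 : String), Dom_are_compatible_entry_types_py type1 type2 → Spec_are_compatible_entry_types_py type1 type2 (are_compatible_entry_types_py type1 type2)

-- ===== LEMMAS AND PROOFS =====

-- the 27 pairs are distinct, so the set is the literal flatMap list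
theorem pvCompatPairs_eq : pvCompatPairs =
    [("geometry_optimization", "geometry_optimization"), ("geometry_optimization", "single_point"), ("geometry_optimization", "dos"),
     ("single_point", "geometry_optimization"), ("single_point", "single_point"), ("single_point", "dos"),
     ("dos", "geometry_optimization"), ("dos", "single_point"), ("dos", "dos"),
     ("structure", "structure"), ("structure", "scf"), ("structure", "band_structure"),
     ("scf", "structure"), ("scf", "scf"), ("scf", "band_structure"),
     ("band_structure", "structure"), ("band_structure", "scf"), ("band_structure", "band_structure"),
     ("optimization", "optimization"), ("optimization", "frequency"), ("optimization", "thermodynamics"),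
     ("frequency", "optimization"), ("frequency", "frequency"), ("frequency", "thermodynamics"),
     ("thermodynamics", "optimization"), ("thermodynamics", "frequency"), ("thermodynamics", "thermodynamics")] := by
  decide

-- ===== VERDICT =====
set_option maxHeartbeats 2000000 in
theorem are_compatible_entry_types_py_spec : Claim_equal_are_compatible_entry_types_py := by
  intro type1 type2 _
  unfold Spec_are_compatible_entry_types_py are_compatible_entry_types_py
    are_compatible_entry_types_py_alt pvCompatibleSequences
  rw [pvCompatPairs_eq]
  simp only [pvCompatLoop, Bool.if_true_left]
  generalize (PySem.Str.lower type1) = l1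
  generalize (PySem.Str.lower type2) = l2
  simp only [PySem.Set.contains, List.contains_eq_mem, List.mem_cons, List.not_mem_nil, or_false,
    Prod.mk.injEq]
  rw [Bool.eq_iff_iff]
  simp only [Bool.or_eq_true, Bool.and_eq_true, decide_eq_true_eq]
  rw [iff_iff_eq]
  simp only [or_and_right, and_or_left, or_assoc, Bool.false_eq_true, or_false]
  ac_rfl
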